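-- pv_equiv track=rewrite | github.com/SniperglazHP/Proyecto_RAG | scripts/generacion_respuestas/generar_dataset.py | dividir_texto_en_paginas_por_proporcion
-- ===== SOURCE A (Python) =====
-- def dividir_texto_en_paginas_por_proporcion(texto, n_paginas):
--     """
--     Divide el contenido del .md en N partes iguales,
--     usando la cantidad de páginas del PDF original.
--     """
--     lineas = texto.split("\n")
--     total_lineas = len(lineas)
--     tamaño_pagina = total_lineas // n_paginas
--     paginas = []
--
--     for i in range(n_paginas):
--         inicio = i * tamaño_pagina
--         fin = (i + 1) * tamaño_pagina if i < n_paginas - 1 else total_lineas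
--         paginas.append("\n".join(lineas[inicio:fin]).strip())
--     return paginas
-- ===== SOURCE B (Python) =====
-- def dividir_texto_en_paginas_por_proporcion(texto, n_paginas):
--     """Divide the text into n_paginas pages of roughly equal line counts,
--     consuming the line list as a stream: slice q lines off the front for
--     each page, the last page takes whatever remains."""
--     lineas = texto.split("\n")
--     q = len(lineas) // n_paginas
--     paginas = []
--     resto = lineas
--     for _ in range(n_paginas - 1):
--         paginas.append("\n".join(resto[:q]).strip())
--         resto = resto[q:]
--     paginas.append("\n".join(resto).strip())
--     return paginas
-- ===== Notes on version B (the rewrite author's own statement) =====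
-- stated objective: alternative
-- what changed: B builds pages by consuming the line list as a stream (slice q lines off the front per page, last page takes the remainder) instead of computing i*size start/end indices into the full list; Pre_ restricts to the natural domain n_paginas > 0: on n_paginas == 0 both programs raise ZeroDivisionError, and negative page counts are outside the natural domain (A accidentally returns [] there, B returns the whole text as one page).
-- outside the precondition, e.g. on dividir_texto_en_paginas_por_proporcion('a\nb', -1): A returns [], B returns ['a\nb']; on dividir_texto_en_paginas_por_proporcion('a', 0): A raises ZeroDivisionError, B raises ZeroDivisionError
import Mathlib
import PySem

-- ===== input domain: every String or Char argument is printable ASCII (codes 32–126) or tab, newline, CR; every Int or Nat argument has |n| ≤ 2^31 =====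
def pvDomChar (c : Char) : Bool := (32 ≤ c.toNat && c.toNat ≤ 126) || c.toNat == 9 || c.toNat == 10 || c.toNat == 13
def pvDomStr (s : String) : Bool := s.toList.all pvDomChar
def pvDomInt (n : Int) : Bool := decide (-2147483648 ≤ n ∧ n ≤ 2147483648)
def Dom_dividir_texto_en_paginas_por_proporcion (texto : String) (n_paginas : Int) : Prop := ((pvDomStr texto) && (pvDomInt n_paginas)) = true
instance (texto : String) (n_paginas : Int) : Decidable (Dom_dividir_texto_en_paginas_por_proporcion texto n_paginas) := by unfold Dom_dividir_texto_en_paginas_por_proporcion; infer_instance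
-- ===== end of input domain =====

-- B pages the text by consuming the line list as a stream (slice q lines off the front per page,
-- last page takes the remainder) instead of computing i*size start/end indices; same cost, alternative structure.

-- ===== PORT A =====
def dividir_texto_en_paginas_por_proporcion (texto : String) (n_paginas : Int) : List String :=
  let lineas := (PySem.Str.split? texto "\n").getD []
  let total_lineas : Int := lineas.length
  let tam := PySem.Int.floordiv total_lineas n_paginas
  (PySem.List.pyRange 0 n_paginas 1).foldl (fun paginas i =>
    let inicio := i * tam
    let fin := if i < n_paginas - 1 then (i + 1) * tam else total_lineas
    paginas ++ [PySem.Str.strip (PySem.Str.join "\n" (PySem.List.slice lineas (some inicio) (some fin)))]) []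

-- ===== PORT B =====
-- the 'for _ in range(n_paginas - 1)' loop of Source B: state = (paginas, resto)
def pvBLoop (q : Int) : Nat → List String × List String → List String × List String
  | 0, st => st
  | k + 1, (paginas, resto) =>
      pvBLoop q k
        (paginas ++ [PySem.Str.strip (PySem.Str.join "\n" (PySem.List.slice resto none (some q)))],
         PySem.List.slice resto (some q) none)

def dividir_texto_en_paginas_por_proporcion_alt (texto : String) (n_paginas : Int) : List String :=
  let lineas := (PySem.Str.split? texto "\n").getD []
  let q := PySem.Int.floordiv (lineas.length : Int) n_paginas
  let st := pvBLoop q (n_paginas - 1).toNat ([], lineas)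
  st.1 ++ [PySem.Str.strip (PySem.Str.join "\n" st.2)]

-- ===== PRECONDITION & SPEC =====
-- Pre_ restricts to the natural domain of positive page counts: on n_paginas == 0 both
-- programs raise ZeroDivisionError, and negative page counts are outside the natural domain
-- (A accidentally returns [] there, an artefact of range() over a negative count).
def Pre_dividir_texto_en_paginas_por_proporcion (texto : String) (n_paginas : Int) : Prop := 0 < n_paginas
instance (texto : String) (n_paginas : Int) : Decidable (Pre_dividir_texto_en_paginas_por_proporcion texto n_paginas) := by unfold Pre_dividir_texto_en_paginas_por_proporcion; infer_instance
def pvWitness_dividir_texto_en_paginas_por_proporcion : String × Int := ("a\nb\nc", 2)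

def Spec_dividir_texto_en_paginas_por_proporcion (texto : String) (n_paginas : Int) (out : List String) : Prop := out = dividir_texto_en_paginas_por_proporcion_alt texto n_paginas
instance (texto : String) (n_paginas : Int) (out : List String) : Decidable (Spec_dividir_texto_en_paginas_por_proporcion texto n_paginas out) := by unfold Spec_dividir_texto_en_paginas_por_proporcion; infer_instance

-- ===== CLAIM (what is proved, stated in full; the proofs are below) =====
def Claim_equal_dividir_texto_en_paginas_por_proporcion : Prop := ∀ (texto : String) (n_paginas : Int), Dom_dividir_texto_en_paginas_por_proporcion texto n_paginas → Pre_dividir_texto_en_paginas_por_proporcion texto n_paginas → Spec_dividir_texto_en_paginas_por_proporcion texto n_paginas (dividir_texto_en_paginas_por_proporcion texto n_paginas)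

-- ===== LEMMAS AND PROOFS =====
set_option maxHeartbeats 1000000 in

-- B's loop, characterized: j rounds starting from (acc, rest) append the j chunk pages and drop j*q lines.
theorem pvBLoop_spec (q j : Nat) (acc rest : List String) :
    pvBLoop (q : Int) j (acc, rest) =
      (acc ++ (List.range j).map (fun i =>
          PySem.Str.strip (PySem.Str.join "\n" ((rest.drop (i * q)).take q))),
       rest.drop (j * q)) := by
  induction j generalizing acc rest with
  | zero => simp [pvBLoop]
  | succ k ih =>
      rw [pvBLoop, ih, PySem.List.slice_to_natCast, PySem.List.slice_from_natCast,
          List.range_succ_eq_map]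
      simp only [Prod.mk.injEq]
      constructor
      · rw [List.map_cons, List.map_map, List.append_assoc, List.singleton_append]
        congr 2
        · rw [Nat.zero_mul, List.drop_zero]
        · apply List.map_congr_left
          intro i _
          have h : q + i * q = (i + 1) * q := by ring
          simp only [Function.comp_apply, List.drop_drop, Nat.succ_eq_add_one, h]
      · rw [List.drop_drop]
        congr 1
        ring

-- splitting 'map f (range (m+1))' into first m images and the image of m
theorem pv_split_map_last {α : Type} (f g : Nat → α) (m : Nat)
    (h1 : ∀ k, k < m → f k = g k) (last : α) (h2 : f m = last) :
    List.map f (List.range (m + 1)) = List.map g (List.range m) ++ [last] := by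
  rw [List.range_succ, List.map_append, List.map_cons, List.map_nil, h2,
      List.map_congr_left (fun k hk => h1 k (List.mem_range.mp hk))]

set_option maxHeartbeats 2000000 in
theorem dividir_texto_en_paginas_por_proporcion_spec : Claim_equal_dividir_texto_en_paginas_por_proporcion := by
  intro texto n _hdom hpre
  have hpos : 0 < n := hpre
  unfold Spec_dividir_texto_en_paginas_por_proporcion
  unfold dividir_texto_en_paginas_por_proporcion dividir_texto_en_paginas_por_proporcion_alt
  simp only []
  generalize (PySem.Str.split? texto "\n").getD [] = L
  obtain ⟨m, rfl⟩ : ∃ m : Nat, n = (m : Int) := ⟨n.toNat, by omega⟩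
  have hm : 0 < m := by exact_mod_cast hpos
  set t : Nat := L.length with ht
  have hq : PySem.Int.floordiv (L.length : Int) (m : Int) = ((t / m : Nat) : Int) := by
    exact_mod_cast PySem.Int.floordiv_natCast t m
  set q : Nat := t / m with hqdef
  rw [hq]
  -- A side: foldl over range
  rw [PySem.List.pyRange_one]
  simp only [Int.sub_zero, Int.toNat_natCast, List.foldl_map,
    PySem.List.foldl_append_singleton_eq_map, List.nil_append]
  -- B side
  have h2 : ((m : Int) - 1).toNat = m - 1 := by omega
  rw [h2, pvBLoop_spec q (m - 1) [] L]
  simp only [List.nil_append]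
  -- split A's map over range (m'+1) into the first m' pages and the last page
  obtain ⟨m', rfl⟩ : ∃ m', m = m' + 1 := ⟨m - 1, by omega⟩
  simp only [Nat.add_sub_cancel]
  refine pv_split_map_last _ _ m' ?_ _ ?_
  · -- first m' pages agree
    intro k hk'
    have hcond : (0 : Int) + (k : Int) < (↑(m' + 1) : Int) - 1 := by push_cast; omega
    rw [if_pos hcond]
    have e1 : ((0 : Int) + (k : Int)) * (q : Int) = ((k * q : Nat) : Int) := by push_cast; ring
    have e2 : ((0 : Int) + (k : Int) + 1) * (q : Int) = ((k * q + q : Nat) : Int) := by push_cast; ring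
    have e3 : k * q + q - k * q = q := by simp
    rw [e1, e2, PySem.List.slice_natCast, e3]
  · -- last page agrees
    have hcond : ¬ ((0 : Int) + (m' : Int) < (↑(m' + 1) : Int) - 1) := by push_cast; omega
    rw [if_neg hcond]
    have e1 : ((0 : Int) + (m' : Int)) * (q : Int) = ((m' * q : Nat) : Int) := by push_cast; ring
    rw [e1, PySem.List.slice_natCast,
        List.take_of_length_le (by simp [List.length_drop, ht])]
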